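-- pv_equiv track=rewrite | github.com/henryZe/code | leetcode/now_coder/97_topKstrings.py | topKstrings
-- ===== SOURCE A (Python) =====
-- def topKstrings(strings, k):
--     str_dict = {}
--     for s in strings:
--         if s not in str_dict:
--             str_dict[s] = 1
--         else:
--             str_dict[s] += 1
--
--     str_set = list(set(strings))
--     # sorted by alphabets
--     str_set.sort()
--     n_set = len(str_set)
--     str_index = list(range(n_set))
--
--     def compare(x):
--         return str_dict[str_set[x]]
--     # sorted by times of appearance
--     str_index.sort(key=compare, reverse=True)
--
--     ret = []
--     for i in str_index[:k]:
--         ret.append([str_set[i], str(str_dict[str_set[i]])])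
--
--     return ret
-- ===== SOURCE B (Python) =====
-- def topKstrings(strings, k):
--     freq = {}
--     for s in strings:
--         freq[s] = freq.get(s, 0) + 1
--
--     buckets = {}
--     for s, c in freq.items():
--         buckets.setdefault(c, []).append(s)
--
--     ordered = []
--     for c in sorted(buckets.keys(), reverse=True):
--         for s in sorted(buckets[c]):
--             ordered.append([s, str(c)])
--
--     return ordered[:k]
-- ===== Notes on version B (the rewrite author's own statement) =====
-- stated objective: alternative
-- what changed: Instead of A's sort-all-distinct-strings-then-stable-sort-an-index-array-by-descending-count, B buckets the distinct strings by their count in a dict, walks the counts in descending order emitting each bucket sorted alphabetically, and slices the result to k.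
import Mathlib
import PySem

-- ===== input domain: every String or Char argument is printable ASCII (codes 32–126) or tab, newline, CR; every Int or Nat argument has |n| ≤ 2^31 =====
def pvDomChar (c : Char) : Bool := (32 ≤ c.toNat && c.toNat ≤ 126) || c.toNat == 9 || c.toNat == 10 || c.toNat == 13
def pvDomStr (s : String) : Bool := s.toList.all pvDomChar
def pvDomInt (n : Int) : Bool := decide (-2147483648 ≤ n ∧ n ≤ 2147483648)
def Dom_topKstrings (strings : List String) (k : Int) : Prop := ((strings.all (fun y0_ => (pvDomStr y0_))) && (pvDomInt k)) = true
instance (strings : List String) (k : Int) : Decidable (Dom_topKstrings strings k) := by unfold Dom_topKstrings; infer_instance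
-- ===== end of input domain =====

-- B groups the distinct strings into count-buckets and emits the buckets in descending
-- count order (strings sorted inside each bucket), instead of A's index sort; objective: alternative.

-- ===== PORT A =====
def topKstrings (strings : List String) (k : Int) : List (List String) :=
  let strDict : PySem.Dict String Int :=
    strings.foldl (fun d s =>
      if d.contains s = false then d.insert s 1 else d.insert s (d.getD s 0 + 1))
      PySem.Dict.empty
  let strSet : List String :=
    PySem.List.sorted (PySem.Set.ofList strings) (fun x => x) false
  let nSet : Int := (strSet.length : Int)
  let strIndex : List Int :=
    PySem.List.sorted (PySem.List.pyRange 0 nSet 1)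
      (fun x => strDict.getD (PySem.List.pyGetD strSet x "") 0) true
  (PySem.List.slice strIndex none (some k)).foldl
    (fun ret i => ret ++ [[PySem.List.pyGetD strSet i "",
      PySem.Int.toStr (strDict.getD (PySem.List.pyGetD strSet i "") 0)]]) []

-- ===== PORT B =====
def topKstrings_alt (strings : List String) (k : Int) : List (List String) :=
  let freq : PySem.Dict String Int :=
    strings.foldl (fun d s => d.insert s (d.getD s 0 + 1)) PySem.Dict.empty
  let buckets : PySem.Dict Int (List String) :=
    freq.items.foldl (fun d p => d.modify p.2 [] (fun l => l ++ [p.1])) PySem.Dict.empty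
  let ordered : List (List String) :=
    (PySem.List.sorted buckets.keys (fun c => c) true).foldl
      (fun acc c =>
        (PySem.List.sorted (buckets.getD c []) (fun s => s) false).foldl
          (fun acc2 s => acc2 ++ [[s, PySem.Int.toStr c]]) acc) []
  PySem.List.slice ordered none (some k)

-- ===== PRECONDITION & SPEC =====
def Spec_topKstrings (strings : List String) (k : Int) (out : List (List String)) : Prop := out = topKstrings_alt strings k
instance (strings : List String) (k : Int) (out : List (List String)) : Decidable (Spec_topKstrings strings k out) := by unfold Spec_topKstrings; infer_instance

-- ===== CLAIM (what is proved, stated in full; the proofs are below) =====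
def Claim_equal_topKstrings : Prop := ∀ (strings : List String) (k : Int), Dom_topKstrings strings k → Spec_topKstrings strings k (topKstrings strings k)

-- ===== LEMMAS AND PROOFS =====

def pvR (key : Int → Int) (a b : Int) : Prop := key b < key a ∨ (key a = key b ∧ a < b)

theorem pv_insertBy_stable (key : Int → Int) (x : Int) :
    ∀ (acc : List Int), acc.Pairwise (pvR key) → (∀ y ∈ acc, y < x) →
      (PySem.List.insertBy (fun a b => decide (key b < key a)) x acc).Pairwise (pvR key) := by
  intro acc
  induction acc with
  | nil => intro _ _; simp [PySem.List.insertBy, pvR]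
  | cons y ys ih =>
    intro hp hb
    rw [PySem.List.insertBy]
    by_cases h : key y < key x
    · simp only [h, decide_true, if_true]
      constructor
      · intro z hz
        rcases List.mem_cons.mp hz with rfl | hz
        · exact Or.inl h
        · rcases (List.pairwise_cons.mp hp).1 z hz with h1 | ⟨h1, _⟩
          · exact Or.inl (lt_trans h1 h)
          · exact Or.inl (h1 ▸ h)
      · exact hp
    · simp only [h, decide_false, ]
      have hys := (List.pairwise_cons.mp hp).2
      have hby : ∀ z ∈ ys, z < x := fun z hz => hb z (List.mem_cons_of_mem _ hz)
      constructor
      · intro z hz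
        rcases (PySem.List.insertBy_mem_iff _ _ _ _).mp hz with rfl | hz
        · rcases lt_or_eq_of_le (not_lt.mp h) with h1 | h1
          · exact Or.inl h1
          · exact Or.inr ⟨h1.symm, hb y (List.mem_cons_self)⟩
        · exact (List.pairwise_cons.mp hp).1 z hz
      · exact ih hys hby

theorem pv_foldl_insertBy_stable (key : Int → Int) :
    ∀ (xs acc : List Int), xs.Pairwise (· < ·) → acc.Pairwise (pvR key) →
      (∀ y ∈ acc, ∀ z ∈ xs, y < z) →
      (xs.foldl (fun acc x => PySem.List.insertBy (fun a b => decide (key b < key a)) x acc) acc).Pairwise (pvR key) := by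
  intro xs
  induction xs with
  | nil => intro acc _ hp _; simpa using hp
  | cons x xs ih =>
    intro acc hxs hp hb
    simp only [List.foldl_cons]
    apply ih _ (List.pairwise_cons.mp hxs).2
    · exact pv_insertBy_stable key x acc hp (fun y hy => hb y hy x List.mem_cons_self)
    · intro y hy z hz
      rcases (PySem.List.insertBy_mem_iff _ _ _ _).mp hy with rfl | hy
      · exact (List.pairwise_cons.mp hxs).1 z hz
      · exact hb y hy z (List.mem_cons_of_mem _ hz)

theorem pv_sorted_rev_stable (xs : List Int) (key : Int → Int) (h : xs.Pairwise (· < ·)) :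
    (PySem.List.sorted xs key true).Pairwise (pvR key) := by
  rw [PySem.List.sorted_rev_eq_foldl_insertBy]
  exact pv_foldl_insertBy_stable key xs [] h (by simp) (by simp)

theorem pv_pyRange_pairwise (n : Nat) : (PySem.List.pyRange 0 (n : Int)).Pairwise (· < ·) := by
  rw [PySem.List.pyRange_zero_natCast]
  exact (List.pairwise_map).mpr ((List.pairwise_lt_range).imp (by intro a b h; exact_mod_cast h))

theorem pv_flatMap_filter_perm (f : String → Int) :
    ∀ (cs : List Int) (l : List String), cs.Nodup → (∀ x ∈ l, f x ∈ cs) →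
      (cs.flatMap (fun c => l.filter (fun x => f x == c))).Perm l := by
  intro cs
  induction cs with
  | nil =>
    intro l _ hcov
    cases l with
    | nil => simp
    | cons a t => exact absurd (hcov a List.mem_cons_self) (by simp)
  | cons c cs ih =>
    intro l hnd hcov
    simp only [List.flatMap_cons]
    have hstep : cs.flatMap (fun c' => l.filter (fun x => f x == c')) =
        cs.flatMap (fun c' => (l.filter (fun x => !(f x == c))).filter (fun x => f x == c')) := by
      apply List.flatMap_congr
      intro c' hc'
      rw [List.filter_filter]
      apply List.filter_congr
      intro x _
      by_cases hx : f x == c'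
      · have : ¬ (f x == c) = true := by
          simp only [beq_iff_eq] at hx ⊢
          intro hcc; exact (List.nodup_cons.mp hnd).1 (hcc ▸ hx ▸ hc')
        simp [hx, this]
      · simp [hx]
    rw [hstep]
    have hperm := ih (l.filter (fun x => !(f x == c))) (List.nodup_cons.mp hnd).2
      (by
        intro x hx
        have h1 := List.of_mem_filter hx
        have h2 := hcov x (List.mem_of_mem_filter hx)
        simp only [Bool.not_eq_true', beq_eq_false_iff_ne] at h1
        rcases List.mem_cons.mp h2 with h3 | h3
        · exact absurd h3 h1
        · exact h3)
    exact (List.Perm.append_left _ hperm).trans (List.filter_append_perm _ l)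

theorem pv_dictA_eq (strings : List String) :
    (strings.foldl (fun d s =>
      if d.contains s = false then d.insert s 1 else d.insert s (d.getD s 0 + 1))
      PySem.Dict.empty : PySem.Dict String Int)
    = strings.foldl (fun d s => d.insert s (d.getD s 0 + 1)) PySem.Dict.empty := by
  apply PySem.List.foldl_congr_mem
  intro d s _
  by_cases h : d.contains s
  · simp [h]
  · simp only [Bool.not_eq_true] at h
    simp [h, PySem.Dict.getD_of_not_contains d 0 h]

theorem pv_count_getD (strings : List String) (s : String) :
    (strings.foldl (fun d s => d.insert s (d.getD s 0 + 1)) PySem.Dict.empty).getD s 0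
      = (strings.count s : Int) := by
  simpa using PySem.Dict.getD_foldl_insert_add_one strings PySem.Dict.empty s

theorem pv_freq_keys (strings : List String) :
    (strings.foldl (fun d s => d.insert s (d.getD s 0 + 1)) (PySem.Dict.empty : PySem.Dict String Int)).keys
      = PySem.Set.ofList strings := by
  rw [PySem.Dict.keys_foldl_insert strings (fun d x => d.getD x 0 + 1) PySem.Dict.empty]
  simp [PySem.Dict.keys_empty, PySem.Set.update, PySem.Set.ofList]

theorem pv_freq_nodup (strings : List String) :
    (strings.foldl (fun d s => d.insert s (d.getD s 0 + 1)) (PySem.Dict.empty : PySem.Dict String Int)).keys.Nodup := by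
  rw [pv_freq_keys]; exact PySem.Set.nodup_ofList strings

theorem pv_freq_items (strings : List String) :
    (strings.foldl (fun d s => d.insert s (d.getD s 0 + 1)) (PySem.Dict.empty : PySem.Dict String Int)).items
      = (PySem.Set.ofList strings).map (fun s => (s, (strings.count s : Int))) := by
  rw [PySem.Dict.items_eq_map_keys _ (pv_freq_nodup strings) (0 : Int), pv_freq_keys]
  exact List.map_congr_left (fun s _ => by rw [pv_count_getD])

theorem pv_map_slice_to {α β : Type} (f : α → β) (l : List α) (k : Int) :
    (PySem.List.slice l none (some k)).map f = PySem.List.slice (l.map f) none (some k) := by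
  simp [PySem.List.slice, List.map_take]

theorem pv_bucket_getD (l : List (String × Int)) (c : Int) :
    (l.foldl (fun d p => d.modify p.2 [] (fun v => v ++ [p.1]))
        (PySem.Dict.empty : PySem.Dict Int (List String))).getD c []
      = (l.filter (fun p => p.2 == c)).map (fun p => p.1) := by
  have h : l.foldl (fun d p => d.modify p.2 [] (fun v => v ++ [p.1]))
        (PySem.Dict.empty : PySem.Dict Int (List String))
      = (l.map (fun p => (p.2, p.1))).foldl (fun d q => d.modify q.1 [] (fun v => v ++ [q.2]))
        (PySem.Dict.empty : PySem.Dict Int (List String)) := by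
    rw [List.foldl_map]
  rw [h, PySem.Dict.getD_foldl_modify_append]
  simp [List.filter_map, List.map_map, Function.comp_def]

theorem pv_buckets_keys (l : List (String × Int)) :
    (l.foldl (fun d p => d.modify p.2 [] (fun v => v ++ [p.1]))
        (PySem.Dict.empty : PySem.Dict Int (List String))).keys
      = PySem.Set.ofList (l.map (fun p => p.2)) := by
  rw [PySem.Dict.keys_foldl_modify_key l (fun p => p.2) [] (fun _ p => fun v => v ++ [p.1])]
  simp [PySem.Dict.keys_empty, PySem.Set.update, PySem.Set.ofList]

theorem pv_core (strings : List String) :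
    (PySem.List.sorted
        (PySem.List.pyRange 0 ((PySem.List.sorted (PySem.Set.ofList strings) (fun x => x) false).length : Int))
        (fun i => (strings.count (PySem.List.pyGetD (PySem.List.sorted (PySem.Set.ofList strings) (fun x => x) false) i "") : Int)) true).map
        (fun i => PySem.List.pyGetD (PySem.List.sorted (PySem.Set.ofList strings) (fun x => x) false) i "")
      = (PySem.List.sorted (PySem.Set.ofList ((PySem.Set.ofList strings).map (fun s => (strings.count s : Int)))) (fun c => c) true).flatMap
          (fun c => PySem.List.sorted ((PySem.Set.ofList strings).filter (fun s => (strings.count s : Int) == c)) (fun x => x) false) := by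
  set cnt : String → Int := fun s => (strings.count s : Int) with hcntdef
  set D : List String := PySem.Set.ofList strings with hDdef
  set S : List String := PySem.List.sorted D (fun x => x) false with hSdef
  set counts : List Int := PySem.Set.ofList (D.map cnt) with hcountsdef
  set get : Int → String := fun i => PySem.List.pyGetD S i "" with hgetdef
  set idx : List Int := PySem.List.sorted (PySem.List.pyRange 0 (S.length : Int)) (fun i => cnt (get i)) true with hidxdef
  set sc : List Int := PySem.List.sorted counts (fun c => c) true with hscdef
  set bucket : Int → List String := fun c => PySem.List.sorted (D.filter (fun s => cnt s == c)) (fun x => x) false with hbdef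
  have hDnd : D.Nodup := PySem.Set.nodup_ofList strings
  have hSlt : S.Pairwise (· < ·) := PySem.List.sorted_ofList_pairwise_lt strings
  have hSperm : S.Perm D := PySem.List.sorted_perm D (fun x => x) false
  have hmemidx : ∀ i ∈ idx, 0 ≤ i ∧ i < (S.length : Int) := by
    intro i hi
    rw [hidxdef, PySem.List.mem_sorted, PySem.List.mem_pyRange_one] at hi
    exact hi
  have hcntmem : ∀ c : Int, ∀ s ∈ bucket c, cnt s = c := by
    intro c s hs
    rw [hbdef] at hs
    rw [PySem.List.mem_sorted] at hs
    have := List.of_mem_filter hs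
    exact beq_iff_eq.mp this
  -- the composite key
  set key : String → Lex (Int × String) := fun s => toLex (-(cnt s), s) with hkeydef
  -- Pairwise (strict) for the A side
  have hstab : idx.Pairwise (pvR (fun i => cnt (get i))) :=
    pv_sorted_rev_stable _ _ (pv_pyRange_pairwise S.length)
  have hpwA : (idx.map get).Pairwise (fun a b => key a < key b) := by
    rw [List.pairwise_map]
    refine List.Pairwise.imp_of_mem ?_ hstab
    intro i j hi hj hR
    obtain ⟨hi0, hi1⟩ := hmemidx i hi
    obtain ⟨hj0, hj1⟩ := hmemidx j hj
    simp only [pvR] at hR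
    rcases hR with hlt | ⟨heq, hij⟩
    · exact Prod.Lex.toLex_lt_toLex.mpr (Or.inl (by omega))
    · refine Prod.Lex.toLex_lt_toLex.mpr (Or.inr ⟨by rw [heq], ?_⟩)
      have hgi : get i = S[i.toNat]'(by omega) := PySem.List.pyGetD_eq_getElem S "" hi0 hi1
      have hgj : get j = S[j.toNat]'(by omega) := PySem.List.pyGetD_eq_getElem S "" hj0 hj1
      rw [hgi, hgj]
      exact List.pairwise_iff_getElem.mp hSlt i.toNat j.toNat (by omega) (by omega) (by omega)
  -- Pairwise (strict) for the B side
  have hscnd : sc.Nodup := by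
    rw [hscdef]
    exact ((PySem.List.sorted_perm counts (fun c => c) true).nodup_iff).mpr
      (PySem.Set.nodup_ofList _)
  have hpwB : (sc.flatMap bucket).Pairwise (fun a b => key a < key b) := by
    rw [List.pairwise_flatMap]
    constructor
    · intro c _
      have h1 : (bucket c).Pairwise (· ≤ ·) := PySem.List.sorted_pairwise _ (fun x => x)
      have h2 : (bucket c).Nodup := by
        rw [hbdef]
        exact ((PySem.List.sorted_perm _ (fun x => x) false).nodup_iff).mpr
          (List.Nodup.filter _ hDnd)
      refine List.Pairwise.imp_of_mem ?_ (h1.and h2)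
      intro a b ha hb hab
      refine Prod.Lex.toLex_lt_toLex.mpr (Or.inr ⟨?_, lt_of_le_of_ne hab.1 hab.2⟩)
      rw [hcntmem c a ha, hcntmem c b hb]
    · have h1 : sc.Pairwise (fun a b => b ≤ a) := PySem.List.sorted_pairwise_rev counts (fun c => c)
      refine List.Pairwise.imp_of_mem ?_ (h1.and hscnd)
      intro c1 c2 _ _ h x hx y hy
      have hx1 : cnt x = c1 := hcntmem c1 x hx
      have hy2 : cnt y = c2 := hcntmem c2 y hy
      have : c2 < c1 := lt_of_le_of_ne h.1 (fun e => h.2 e.symm)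
      exact Prod.Lex.toLex_lt_toLex.mpr (Or.inl (by omega))
  -- permutations
  have hpermA : (idx.map get).Perm S := by
    have h1 : idx.Perm (PySem.List.pyRange 0 (S.length : Int)) :=
      PySem.List.sorted_perm _ _ true
    have h2 := h1.map get
    have h3 : (PySem.List.pyRange 0 (S.length : Int)).map get = S := by
      have := PySem.List.map_pyGetD_pyRange_zero S ""
      simpa [PySem.List.len, hgetdef] using this
    rw [h3] at h2
    exact h2
  have hpermB : (sc.flatMap bucket).Perm D := by
    have h1 : (sc.flatMap bucket).Perm (counts.flatMap bucket) :=
      List.Perm.flatMap_right bucket (PySem.List.sorted_perm counts (fun c => c) true)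
    have h2 : (counts.flatMap bucket).Perm (counts.flatMap (fun c => D.filter (fun s => cnt s == c))) := by
      apply List.Perm.flatMap_left
      intro c _
      exact PySem.List.sorted_perm _ (fun x => x) false
    have h3 : (counts.flatMap (fun c => D.filter (fun s => cnt s == c))).Perm D := by
      apply pv_flatMap_filter_perm cnt counts D (PySem.Set.nodup_ofList _)
      intro x hx
      rw [hcountsdef]
      rw [PySem.Set.mem_ofList]
      exact List.mem_map_of_mem hx
    exact (h1.trans h2).trans h3
  -- conclude
  exact PySem.List.eq_of_perm_of_pairwise_le_of_pairwise_lt key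
    ((hpermA.trans hSperm).trans hpermB.symm)
    (hpwA.imp le_of_lt) hpwB

theorem topKstrings_eq (strings : List String) (k : Int) :
    topKstrings strings k = topKstrings_alt strings k := by
  unfold topKstrings topKstrings_alt
  rw [pv_dictA_eq]
  simp only [pv_count_getD, pv_freq_items, pv_bucket_getD, pv_buckets_keys,
    PySem.List.foldl_append_singleton_eq_map, PySem.List.foldl_append_eq_flatMap,
    List.nil_append, List.map_map]
  rw [pv_map_slice_to]
  apply congrArg (fun l => PySem.List.slice l none (some k))
  simp only [List.filter_map, List.map_map, Function.comp_def, List.map_id']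
  have hR : (PySem.List.sorted (PySem.Set.ofList ((PySem.Set.ofList strings).map (fun s => (strings.count s : Int)))) (fun c => c) true).flatMap
        (fun c => ((PySem.List.sorted ((PySem.Set.ofList strings).filter (fun s => ((strings.count s : Int) == c))) (fun x => x) false).map
          (fun s => [s, PySem.Int.toStr c])))
      = ((PySem.List.sorted (PySem.Set.ofList ((PySem.Set.ofList strings).map (fun s => (strings.count s : Int)))) (fun c => c) true).flatMap
        (fun c => PySem.List.sorted ((PySem.Set.ofList strings).filter (fun s => ((strings.count s : Int) == c))) (fun x => x) false)).map
          (fun s => [s, PySem.Int.toStr (strings.count s : Int)]) := by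
    rw [List.map_flatMap]
    apply List.flatMap_congr
    intro c _
    apply List.map_congr_left
    intro s hs
    have hsc : (strings.count s : Int) = c := by
      rw [PySem.List.mem_sorted] at hs
      exact beq_iff_eq.mp (List.of_mem_filter (p := fun s => ((strings.count s : Int) == c)) hs)
    rw [hsc]
  rw [hR, ← pv_core strings, List.map_map]
  rfl

-- ===== VERDICT (by name: the statement is the Claim_ definition above) =====
theorem topKstrings_spec : Claim_equal_topKstrings := by
  intro strings k _
  unfold Spec_topKstrings
  exact topKstrings_eq strings k
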